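-- pv_equiv track=rewrite | github.com/miwa3067/algorithm | chap1/sec2/ans/question2_ans.py | calc_empty
-- ===== SOURCE A (Python) =====
-- EMPTY = 0
--
-- def calc_empty(signs:list):
--     new_vals = []
--     new_signs = []
--     val = 1
--     for i in range(len(signs)):
--         add = i+2
--
--         if signs[i] == EMPTY:
--             val = val*10+add
--         else:
--             new_vals.append(val)
--             new_signs.append(signs[i])
--             val = add
--     new_vals.append(val)
--     return (new_vals, new_signs)
-- ===== SOURCE B (Python) =====
-- def _fold_digits(g):
--     a = g[0]
--     for d in g[1:]:
--         a = a * 10 + d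
--     return a
--
-- def calc_empty(signs: list):
--     groups = [[1]]
--     new_signs = []
--     for i, s in enumerate(signs):
--         if s == 0:
--             groups[-1].append(i + 2)
--         else:
--             new_signs.append(s)
--             groups.append([i + 2])
--     new_vals = [_fold_digits(g) for g in groups]
--     return (new_vals, new_signs)
-- ===== Notes on version B (the rewrite author's own statement) =====
-- stated objective: alternative
-- what changed: B separates the two concerns A interleaves: a first pass partitions the index values (seeded with 1, split at non-empty signs) into a list of groups, and a second pass folds each group with a*10+d into a number, instead of A's single running accumulator flushed in-loop.
import Mathlib
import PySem

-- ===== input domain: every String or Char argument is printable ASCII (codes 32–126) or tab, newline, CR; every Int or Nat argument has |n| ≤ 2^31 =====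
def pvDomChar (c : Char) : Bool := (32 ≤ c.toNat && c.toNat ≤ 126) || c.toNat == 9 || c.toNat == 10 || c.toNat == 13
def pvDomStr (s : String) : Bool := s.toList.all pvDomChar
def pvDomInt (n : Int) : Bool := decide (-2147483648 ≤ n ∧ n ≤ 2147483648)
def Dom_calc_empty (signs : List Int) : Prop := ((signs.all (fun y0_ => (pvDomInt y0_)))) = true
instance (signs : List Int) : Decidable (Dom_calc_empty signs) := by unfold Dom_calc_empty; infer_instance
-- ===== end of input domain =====

-- B groups the digit positions between non-empty signs first and folds each group afterwards
-- (different decomposition, same cost); A interleaves the accumulation in one running value.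

-- ===== PORT A =====
-- one running value `val`, flushed into new_vals at each non-empty sign and once at the end
def calc_empty (signs : List Int) : List Int × List Int :=
  let st := (PySem.List.enumerate signs).foldl
    (fun (st : List Int × List Int × Int) p =>
      let add : Int := p.1 + 2
      if p.2 = 0 then (st.1, st.2.1, st.2.2 * 10 + add)
      else (st.1 ++ [st.2.2], st.2.1 ++ [p.2], add))
    ([], [], 1)
  (st.1 ++ [st.2.2], st.2.1)

-- ===== PORT B =====
-- B-side helper _fold_digits: a = g[0]; for d in g[1:]: a = a*10+d  (groups are never empty)
def pvFoldDigits (g : List Int) : Int :=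
  match g with
  | [] => 0
  | a :: rest => rest.foldl (fun a d => a * 10 + d) a

def calc_empty_alt (signs : List Int) : List Int × List Int :=
  let st := (PySem.List.enumerate signs).foldl
    (fun (st : List (List Int) × List Int) p =>
      if p.2 = 0 then (st.1.dropLast ++ [st.1.getLastD [] ++ [p.1 + 2]], st.2)
      else (st.1 ++ [[p.1 + 2]], st.2 ++ [p.2]))
    ([[1]], [])
  (st.1.map pvFoldDigits, st.2)

-- ===== PRECONDITION & SPEC =====
def Spec_calc_empty (signs : List Int) (out : List Int × List Int) : Prop := out = calc_empty_alt signs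
instance (signs : List Int) (out : List Int × List Int) : Decidable (Spec_calc_empty signs out) := by unfold Spec_calc_empty; infer_instance

-- ===== CLAIM (what is proved, stated in full; the proofs are below) =====
def Claim_equal_calc_empty : Prop := ∀ (signs : List Int), Dom_calc_empty signs → Spec_calc_empty signs (calc_empty signs)

-- ===== LEMMAS AND PROOFS =====

theorem pvFoldDigits_snoc (a : Int) (rest : List Int) (d : Int) :
    pvFoldDigits ((a :: rest) ++ [d]) = pvFoldDigits (a :: rest) * 10 + d := by
  simp [pvFoldDigits, List.foldl_append]

-- loop invariant: B's groups are `gs ++ [a :: g]` with `a :: g` the open group, A's new_vals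
-- are the folded closed groups, and A's running val is the fold of the open group
theorem calc_empty_key (l : List (Int × Int)) :
    ∀ (gs : List (List Int)) (a : Int) (g : List Int) (ns : List Int),
    ((l.foldl
        (fun (st : List (List Int) × List Int) p =>
          if p.2 = 0 then (st.1.dropLast ++ [st.1.getLastD [] ++ [p.1 + 2]], st.2)
          else (st.1 ++ [[p.1 + 2]], st.2 ++ [p.2]))
        (gs ++ [a :: g], ns)).1.map pvFoldDigits
      = (l.foldl
        (fun (st : List Int × List Int × Int) p =>
          if p.2 = 0 then (st.1, st.2.1, st.2.2 * 10 + (p.1 + 2))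
          else (st.1 ++ [st.2.2], st.2.1 ++ [p.2], p.1 + 2))
        (gs.map pvFoldDigits, ns, pvFoldDigits (a :: g))).1
        ++ [(l.foldl
        (fun (st : List Int × List Int × Int) p =>
          if p.2 = 0 then (st.1, st.2.1, st.2.2 * 10 + (p.1 + 2))
          else (st.1 ++ [st.2.2], st.2.1 ++ [p.2], p.1 + 2))
        (gs.map pvFoldDigits, ns, pvFoldDigits (a :: g))).2.2]) ∧
    (l.foldl
        (fun (st : List (List Int) × List Int) p =>
          if p.2 = 0 then (st.1.dropLast ++ [st.1.getLastD [] ++ [p.1 + 2]], st.2)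
          else (st.1 ++ [[p.1 + 2]], st.2 ++ [p.2]))
        (gs ++ [a :: g], ns)).2
      = (l.foldl
        (fun (st : List Int × List Int × Int) p =>
          if p.2 = 0 then (st.1, st.2.1, st.2.2 * 10 + (p.1 + 2))
          else (st.1 ++ [st.2.2], st.2.1 ++ [p.2], p.1 + 2))
        (gs.map pvFoldDigits, ns, pvFoldDigits (a :: g))).2.1 := by
  induction l with
  | nil => intro gs a g ns; simp
  | cons p l ih =>
    intro gs a g ns
    by_cases h : p.2 = 0
    · have hv : pvFoldDigits (a :: (g ++ [p.1 + 2]))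
          = pvFoldDigits (a :: g) * 10 + (p.1 + 2) := pvFoldDigits_snoc a g (p.1 + 2)
      have ih' := ih gs a (g ++ [p.1 + 2]) ns
      rw [hv] at ih'
      simpa [h, List.dropLast_concat, List.getLastD_concat] using ih'
    · have := ih (gs ++ [a :: g]) (p.1 + 2) [] (ns ++ [p.2])
      simpa [h, pvFoldDigits] using this

-- ===== VERDICT (by name: the statement is the Claim_ definition above) =====
theorem calc_empty_spec : Claim_equal_calc_empty := by
  intro signs _
  unfold Spec_calc_empty calc_empty calc_empty_alt
  have h := calc_empty_key (PySem.List.enumerate signs) [] 1 [] []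
  exact Prod.ext h.1.symm h.2.symm
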